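-- pv_equiv track=rewrite | github.com/rhel-lightspeed/goose | check_fedora_deps.py | _find_provides_section
-- ===== SOURCE A (Python) =====
-- from typing import Dict, List, Set, Tuple, Optional
--
-- def _find_provides_section(lines: List[str]) -> Tuple[int, int]:
--     """Find the markers for bundled dependencies section."""
--     start_idx = -1
--     end_idx = -1
--
--     for i, line in enumerate(lines):
--         if '# Bundled dependencies' in line:
--             start_idx = i
--         elif '# End bundled dependencies' in line:
--             end_idx = i
--             break
--
--     if start_idx == -1 or end_idx == -1:
--         raise ValueError("Could not find '# Bundled dependencies' markers in spec file")
--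
--     return (start_idx, end_idx)
-- ===== SOURCE B (Python) =====
-- from typing import Dict, List, Set, Tuple, Optional
--
-- def _find_provides_section(lines):
--     """Find the markers for bundled dependencies section."""
--     end_idx = next((i for i, line in enumerate(lines)
--                     if '# End bundled dependencies' in line), None)
--     if end_idx is None:
--         raise ValueError("Could not find '# Bundled dependencies' markers in spec file")
--     for i, line in reversed(list(enumerate(lines[:end_idx]))):
--         if '# Bundled dependencies' in line:
--             return (i, end_idx)
--     raise ValueError("Could not find '# Bundled dependencies' markers in spec file")
-- ===== Notes on version B (the rewrite author's own statement) =====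
-- stated objective: alternative
-- what changed: Replaces A's single early-exit scan carrying two mutable indices by two passes: first the index of the first end-marker line, then a reverse scan of the prefix before it for the nearest start-marker line; Pre_ excludes inputs where A raises and inputs with a line containing both marker strings, on which A's elif ordering makes the classification accidental.
import Mathlib
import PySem

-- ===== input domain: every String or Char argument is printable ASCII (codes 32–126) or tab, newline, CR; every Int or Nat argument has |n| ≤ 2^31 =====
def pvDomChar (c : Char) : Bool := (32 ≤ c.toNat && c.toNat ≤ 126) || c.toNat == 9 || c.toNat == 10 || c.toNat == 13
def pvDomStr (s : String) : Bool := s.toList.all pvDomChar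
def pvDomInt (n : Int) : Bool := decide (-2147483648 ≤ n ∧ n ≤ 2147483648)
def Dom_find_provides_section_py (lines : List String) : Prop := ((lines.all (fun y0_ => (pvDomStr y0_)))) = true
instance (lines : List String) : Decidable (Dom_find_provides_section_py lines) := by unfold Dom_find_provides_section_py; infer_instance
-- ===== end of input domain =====

-- B replaces A's single early-exit scan carrying two mutable indices by two passes (first
-- end-marker index, then a reverse scan of the prefix before it for the nearest start
-- marker); objective: alternative decomposition, same O(n) cost.

-- marker tests ('sub in line')
def isStartLine (l : String) : Bool := PySem.Str.isIn "# Bundled dependencies" l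
def isEndLine (l : String) : Bool := PySem.Str.isIn "# End bundled dependencies" l

-- ===== PORT A =====
def aLoop : List String → Int → Int → Int → Int × Int
  | [], _, s, e => (s, e)
  | l :: rest, i, s, e =>
    if isStartLine l then aLoop rest (i + 1) i e
    else if isEndLine l then (s, i)
    else aLoop rest (i + 1) s e

def find_provides_section_py (lines : List String) : Int × Int :=
  aLoop lines 0 (-1) (-1)

-- ===== PORT B =====
def find_provides_section_py_alt (lines : List String) : Int × Int :=
  match (PySem.List.enumerate lines).find? (fun p => isEndLine p.2) with
  | none => (-1, -1)          -- B raises ValueError here (outside Pre_)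
  | some p =>
    match ((PySem.List.enumerate (PySem.List.slice lines none (some p.1))).reverse).find?
            (fun q => isStartLine q.2) with
    | some q => (q.1, p.1)
    | none => (-1, -1)        -- B raises ValueError here (outside Pre_)

-- ===== PRECONDITION & SPEC =====
-- Pre_ excludes the inputs on which A raises ValueError (no end-marker line, or no
-- start-marker line strictly before the first end marker) and inputs with a line containing
-- BOTH marker strings at or before the first end-marker line, on which A's elif ordering
-- makes the classification accidental.
def Pre_find_provides_section_py (lines : List String) : Prop :=
  ((lines.take (lines.findIdx isEndLine + 1)).all (fun l => !(isStartLine l && isEndLine l))) = true ∧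
  lines.findIdx isEndLine < lines.length ∧
  ∃ i < lines.findIdx isEndLine, isStartLine (lines.getD i "") = true
instance (lines : List String) : Decidable (Pre_find_provides_section_py lines) := by
  unfold Pre_find_provides_section_py; infer_instance
def pvWitness_find_provides_section_py : List String :=
  ["# Bundled dependencies", "python3-foo", "# End bundled dependencies"]
def Spec_find_provides_section_py (lines : List String) (out : Int × Int) : Prop := out = find_provides_section_py_alt lines
instance (lines : List String) (out : Int × Int) : Decidable (Spec_find_provides_section_py lines out) := by unfold Spec_find_provides_section_py; infer_instance

-- ===== CLAIM =====
def Claim_equal_find_provides_section_py : Prop := ∀ (lines : List String), Dom_find_provides_section_py lines → Pre_find_provides_section_py lines → Spec_find_provides_section_py lines (find_provides_section_py lines)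

-- ===== LEMMAS AND PROOFS =====

-- canonical value of A's loop, phrased with filter/getLast combinators (fallback f for start)
def canon (ls : List String) (i f : Int) : Int × Int :=
  match (PySem.List.enumerate ls i).find? (fun p => isEndLine p.2 && !isStartLine p.2) with
  | some p =>
      ((((PySem.List.enumerate ls i).filter
          (fun q => isStartLine q.2 && decide (q.1 < p.1))).map (fun q => q.1)).getLast?.getD f, p.1)
  | none =>
      ((((PySem.List.enumerate ls i).filter
          (fun q => isStartLine q.2)).map (fun q => q.1)).getLast?.getD f, -1)

lemma fst_lt_of_mem_enumerate {α : Type} {xs : List α} {i : Int} {p : Int × α}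
    (h : p ∈ PySem.List.enumerate xs (i + 1)) : i < p.1 := by
  rcases (PySem.List.mem_enumerate_iff xs (i + 1) p).1 h with ⟨k, hk, rfl⟩
  omega

lemma getLastD_cons (a s : Int) (xs : List Int) :
    ((a :: xs).getLast?).getD s = (xs.getLast?).getD a := by
  rw [List.getLast?_cons]; cases xs.getLast? <;> rfl

lemma aLoop_eq_canon (ls : List String) : ∀ (i s : Int), aLoop ls i s (-1) = canon ls i s := by
  induction ls with
  | nil => intro i s; simp [aLoop, canon, PySem.List.enumerate_nil]
  | cons l rest ih =>
    intro i s
    by_cases hs : isStartLine l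
    · have hpred : (isEndLine l && !isStartLine l) = false := by simp [hs]
      simp only [aLoop, hs, if_true]
      rw [ih (i + 1) i]
      unfold canon
      simp only [PySem.List.enumerate_cons, List.find?_cons, hpred]
      cases hfind : (PySem.List.enumerate rest (i + 1)).find? (fun p => isEndLine p.2 && !isStartLine p.2) with
      | none =>
        simp [hs, getLastD_cons]
      | some p =>
        have hip : i < p.1 := fst_lt_of_mem_enumerate (List.mem_of_find?_eq_some hfind)
        simp only [List.filter_cons, hs, Bool.true_and, hip, decide_true, if_true,
          List.map_cons, getLastD_cons]
    · by_cases he : isEndLine l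
      · have hpred : (isEndLine l && !isStartLine l) = true := by simp [hs, he]
        simp only [aLoop, hs, Bool.false_eq_true, if_false, he, if_true, canon,
          PySem.List.enumerate_cons, List.find?_cons]
        have hfil : ((i, l) :: PySem.List.enumerate rest (i + 1)).filter
            (fun q => isStartLine q.2 && decide (q.1 < i)) = [] := by
          apply List.filter_eq_nil_iff.2
          intro q hq
          rcases List.mem_cons.1 hq with rfl | hq'
          · simp [hs]
          · have := fst_lt_of_mem_enumerate hq'
            simp; omega
        simp [hfil]
      · have hpred : (isEndLine l && !isStartLine l) = false := by simp [he]
        simp only [aLoop, hs, Bool.false_eq_true, if_false, he]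
        rw [ih (i + 1) s]
        unfold canon
        simp only [PySem.List.enumerate_cons, List.find?_cons, hpred]
        cases hfind : (PySem.List.enumerate rest (i + 1)).find? (fun p => isEndLine p.2 && !isStartLine p.2) <;>
          simp [hs]

-- find? on enumerate at the first index satisfying the predicate
lemma find?_enum_of (xs : List String) (f : String → Bool) : ∀ (s : Int) (k : Nat)
    (hk : k < xs.length), f xs[k] = true → (∀ j, (hj : j < k) → f (xs[j]'(by omega)) = false) →
    (PySem.List.enumerate xs s).find? (fun p => f p.2) = some (s + (k : Int), xs[k]) := by
  induction xs with
  | nil => intro s k hk; exact absurd hk (by simp)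
  | cons x xs ih =>
    intro s k hk hx hb
    cases k with
    | zero =>
      simp only [List.getElem_cons_zero] at hx ⊢
      simp [PySem.List.enumerate_cons, hx]
    | succ k =>
      have h0 : f x = false := hb 0 (Nat.succ_pos k)
      simp only [PySem.List.enumerate_cons, List.find?_cons, h0]
      rw [ih (s + 1) k (by simpa using hk) (by simpa using hx)
        (fun j hj => by simpa using hb (j + 1) (by omega))]
      simp; omega

-- splitting the filtered candidates at index k
lemma filter_lt_eq_filter_take (lines : List String) (k : Nat) (hk : k ≤ lines.length) :
    (PySem.List.enumerate lines).filter (fun q => isStartLine q.2 && decide (q.1 < (k : Int))) =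
    (PySem.List.enumerate (lines.take k)).filter (fun q => isStartLine q.2) := by
  conv_lhs => rw [← List.take_append_drop k lines]
  rw [PySem.List.enumerate_append, List.filter_append]
  have h1 : (PySem.List.enumerate (lines.take k)).filter
      (fun q => isStartLine q.2 && decide (q.1 < (k : Int))) =
      (PySem.List.enumerate (lines.take k)).filter (fun q => isStartLine q.2) := by
    apply List.filter_congr
    intro q hq
    rcases (PySem.List.mem_enumerate_iff _ _ q).1 hq with ⟨j, hj, rfl⟩
    have hjk : ((j : Int)) < (k : Int) := by
      have : j < k := by simpa [hk] using hj
      exact_mod_cast this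
    simp [hjk]
  have h2 : (PySem.List.enumerate (lines.drop k) (0 + (lines.take k).length)).filter
      (fun q => isStartLine q.2 && decide (q.1 < (k : Int))) = [] := by
    apply List.filter_eq_nil_iff.2
    intro q hq
    rcases (PySem.List.mem_enumerate_iff _ _ q).1 hq with ⟨j, hj, rfl⟩
    simp [Nat.min_eq_left hk]
  rw [h1, h2, List.append_nil]

lemma find?_eq_head?_filter' {α : Type} (xs : List α) (p : α → Bool) :
    xs.find? p = (xs.filter p).head? := by
  induction xs with
  | nil => rfl
  | cons x xs ih =>
    cases hx : p x
    · rw [List.find?_cons, List.filter_cons, hx]; exact ih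
    · rw [List.find?_cons, List.filter_cons, hx]; rfl

-- the last filtered candidate is the first of the reverse scan
lemma getLast?_filter_eq_find?_reverse (ys : List String) :
    (((PySem.List.enumerate ys).filter (fun q => isStartLine q.2)).map (fun q => q.1)).getLast? =
    (((PySem.List.enumerate ys).reverse).find? (fun q => isStartLine q.2)).map (fun q => q.1) := by
  rw [List.getLast?_eq_head?_reverse, ← List.map_reverse, ← List.filter_reverse,
    find?_eq_head?_filter']
  cases ((PySem.List.enumerate ys).reverse).filter (fun q => isStartLine q.2) <;> simp

-- ===== VERDICT =====
theorem find_provides_section_py_spec : Claim_equal_find_provides_section_py := by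
  intro lines _ hpre
  obtain ⟨hnoboth, hend, hstart⟩ := hpre
  set k := lines.findIdx isEndLine with hkdef
  unfold Spec_find_provides_section_py find_provides_section_py find_provides_section_py_alt
  rw [aLoop_eq_canon lines 0 (-1)]
  unfold canon
  -- both find? passes stop at index k, the first end-marker line (pure, by Pre_)
  have hke : isEndLine lines[k] = true := List.findIdx_getElem (w := hend)
  have hks : isStartLine lines[k] = false := by
    have hmemt : lines[k] ∈ lines.take (k + 1) := by
      have hlt : k < (lines.take (k + 1)).length := by simp; omega
      have heq := List.getElem_take (xs := lines) (i := k) (j := k + 1) (h := hlt)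
      rw [← heq]; exact List.getElem_mem hlt
    have := (List.all_eq_true.1 hnoboth) _ hmemt
    rcases hs : isStartLine lines[k] <;> simp_all
  have hbefore : ∀ j, (hj : j < k) → isEndLine (lines[j]'(Nat.lt_trans hj hend)) = false :=
    fun j hj => List.not_of_lt_findIdx hj
  have hfind1 : (PySem.List.enumerate lines).find? (fun p => isEndLine p.2 && !isStartLine p.2) =
      some ((0 : Int) + (k : Int), lines[k]) :=
    find?_enum_of lines (fun l => isEndLine l && !isStartLine l) 0 k hend (by simp [hke, hks]) (fun j hj => by simp [hbefore j hj])
  have hfind2 : (PySem.List.enumerate lines).find? (fun p => isEndLine p.2) =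
      some ((0 : Int) + (k : Int), lines[k]) :=
    find?_enum_of lines isEndLine 0 k hend hke hbefore
  rw [hfind1, hfind2]
  simp only [zero_add]
  -- reduce both candidate computations to the same prefix
  have hk : k ≤ lines.length := le_of_lt hend
  rw [filter_lt_eq_filter_take lines k hk]
  have hsl : PySem.List.slice lines none (some (k : Int)) = lines.take k :=
    PySem.List.slice_to_natCast lines k
  rw [hsl, getLast?_filter_eq_find?_reverse]
  -- the reverse scan finds a start marker (Pre_ guarantees one before k)
  obtain ⟨i, hik, hi⟩ := hstart
  have hilen : i < lines.length := lt_of_lt_of_le hik hk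
  have hmem : ((i : Int), lines[i]) ∈ (PySem.List.enumerate (lines.take k)).reverse := by
    rw [List.mem_reverse]
    refine (PySem.List.mem_enumerate_iff _ _ _).2 ⟨i, by simp [Nat.min_eq_left hk, hik], ?_⟩
    simp [List.getElem_take]
  have hsome : (((PySem.List.enumerate (lines.take k)).reverse).find?
      (fun q => isStartLine q.2)).isSome := by
    rw [List.find?_isSome]
    refine ⟨_, hmem, ?_⟩
    simpa [List.getD, hilen] using hi
  cases hq : ((PySem.List.enumerate (lines.take k)).reverse).find? (fun q => isStartLine q.2) with
  | none => rw [hq] at hsome; simp at hsome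
  | some q => simp
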